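-- pv_equiv track=rewrite | github.com/JosephMiPatchen/SHA256-Learning | spherical_cow/sandbox.py | evol_num_formula
-- ===== SOURCE A (Python) =====
-- def evol_num_formula(n, seed, c):
--     x, y = seed
--     formula_buffer = [0] * n
--     formula_buffer[0] = x
--     for i in range(1, n - 1):
--         formula_buffer[i] = 2 ** (i - 1) * (x + y + c)
--     formula_buffer[n - 1] = (2 ** (n - 3) * (x + y + c)) - c
--     return formula_buffer
-- ===== SOURCE B (Python) =====
-- def evol_num_formula(n, seed, c):
--     x, y = seed
--     out = [x, x + y + c]
--     while len(out) < n - 1: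
--         out.append(out[-1] * 2)
--     out.append(out[-1] - c)
--     return out
-- ===== Notes on version B (the rewrite author's own statement) =====
-- stated objective: alternative
-- what changed: B grows the list with a while loop using a self-referential doubling recurrence (out.append(out[-1]*2), then last = out[-1]-c), performing no exponentiation at all, instead of writing the closed-form powers 2**(i-1)*(x+y+c) into a preallocated [0]*n buffer index by index.
-- outside the precondition, e.g. on evol_num_formula(1, (2, 3), 4): A returns [-1.75], B returns [2, 9, 5]; on evol_num_formula(2, (2, 3), 4): A returns [2, 0.5], B returns [2, 9, 5]; on evol_num_formula(0, (2, 3), 4): A raises IndexError, B returns [2, 9, 5]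
import Mathlib
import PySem

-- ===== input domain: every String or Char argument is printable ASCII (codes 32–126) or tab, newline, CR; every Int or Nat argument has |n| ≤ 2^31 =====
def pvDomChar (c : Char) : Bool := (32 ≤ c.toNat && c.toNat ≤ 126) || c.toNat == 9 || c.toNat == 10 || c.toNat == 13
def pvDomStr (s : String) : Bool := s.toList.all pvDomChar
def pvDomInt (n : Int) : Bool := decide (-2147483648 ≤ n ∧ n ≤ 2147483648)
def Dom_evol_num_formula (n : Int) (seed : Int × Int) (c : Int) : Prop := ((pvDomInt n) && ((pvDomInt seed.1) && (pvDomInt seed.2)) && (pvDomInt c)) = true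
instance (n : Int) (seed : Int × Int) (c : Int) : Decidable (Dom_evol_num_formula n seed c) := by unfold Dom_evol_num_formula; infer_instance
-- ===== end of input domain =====

-- B grows the list with a while loop and a self-referential doubling recurrence
-- (out.append(out[-1]*2); last = out[-1]-c), doing no exponentiation, instead of
-- writing closed-form powers into a preallocated buffer (alternative algorithm).


-- ===== PORT A =====
def evol_num_formula (n : Int) (seed : Int × Int) (c : Int) : List Int :=
  let x := seed.1
  let y := seed.2
  let buf := List.replicate n.toNat 0
  let buf := buf.set 0 x
  let buf := (PySem.List.pyRange 1 (n - 1) 1).foldl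
    (fun b i => b.set i.toNat ((2 : Int) ^ (i - 1).toNat * (x + y + c))) buf
  buf.set (n - 1).toNat ((2 : Int) ^ (n - 3).toNat * (x + y + c) - c)

-- ===== PORT B =====
-- B's while loop 'while len(out) < n-1: out.append(out[-1]*2)': recursion on the
-- gap target - out.length; out[-1] is ported as getLast! (out is never empty here,
-- so this is exact).
def growB (target : Nat) (out : List Int) : List Int :=
  if out.length < target then growB target (out ++ [out.getLast! * 2]) else out
termination_by target - out.length
decreasing_by simp; omega

def evol_num_formula_alt (n : Int) (seed : Int × Int) (c : Int) : List Int :=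
  let x := seed.1
  let y := seed.2
  let out := [x, x + y + c]
  let out := growB (n - 1).toNat out
  out ++ [out.getLast! - c]

-- ===== PRECONDITION & SPEC =====
-- Pre_ excludes n ≤ 0, where A raises IndexError on the empty buffer, and n ∈ {1, 2},
-- where 2 ** (n - 3) is a negative-exponent power so A returns a float, not an int.
def Pre_evol_num_formula (n : Int) (seed : Int × Int) (c : Int) : Prop := 3 ≤ n
instance (n : Int) (seed : Int × Int) (c : Int) : Decidable (Pre_evol_num_formula n seed c) := by unfold Pre_evol_num_formula; infer_instance
def pvWitness_evol_num_formula : Int × (Int × Int) × Int := (5, (1, 2), 3)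

def Spec_evol_num_formula (n : Int) (seed : Int × Int) (c : Int) (out : List Int) : Prop := out = evol_num_formula_alt n seed c
instance (n : Int) (seed : Int × Int) (c : Int) (out : List Int) : Decidable (Spec_evol_num_formula n seed c out) := by unfold Spec_evol_num_formula; infer_instance

-- ===== CLAIM (what is proved, stated in full; the proofs are below) =====
def Claim_equal_evol_num_formula : Prop := ∀ (n : Int) (seed : Int × Int) (c : Int), Dom_evol_num_formula n seed c → Pre_evol_num_formula n seed c → Spec_evol_num_formula n seed c (evol_num_formula n seed c)

-- ===== LEMMAS AND PROOFS =====

theorem getLast!_concat_int (l : List Int) (a : Int) : (l ++ [a]).getLast! = a := by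
  induction l with
  | nil => rfl
  | cons h t ih => simp [List.getLast!, List.getLast?_eq_some_getLast]

-- A's loop: left-to-right in-range index writes rewrite the middle segment of the
-- buffer, leaving the prefix and the suffix untouched.
theorem foldA_set (g : Int → Int) :
    ∀ (cnt start : Nat) (buf : List Int), start + cnt ≤ buf.length →
    ((List.range cnt).map (fun k : ℕ => ((start : Int) + (k : Int)))).foldl
        (fun b i => b.set i.toNat (g i)) buf
      = buf.take start ++ ((List.range cnt).map fun k : ℕ => g ((start : Int) + (k : Int)))
          ++ buf.drop (start + cnt) := by
  intro cnt
  induction cnt with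
  | zero => intro start buf h; simp
  | succ m ih =>
    intro start buf h
    rw [List.range_succ_eq_map]
    simp only [List.map_cons, List.map_map, List.foldl_cons, Nat.cast_zero, add_zero,
      Int.toNat_natCast]
    have hlt : start < buf.length := by omega
    rw [List.set_eq_take_cons_drop (g (start : Int)) hlt]
    have hfun : ((fun k : ℕ => ((start : Int) + (k : Int))) ∘ Nat.succ)
        = (fun k : ℕ => (((start + 1 : Nat) : Int) + (k : Int))) := by
      funext k; simp [Function.comp, Nat.succ_eq_add_one]; ring
    rw [hfun]
    have hlen' : (buf.take start ++ g (start : Int) :: buf.drop (start + 1)).length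
        = buf.length := by simp; omega
    rw [ih (start + 1) _ (by rw [hlen']; omega)]
    have htk : (buf.take start).length = start := List.length_take_of_le (by omega)
    rw [List.take_append, List.drop_append, htk]
    rw [List.take_of_length_le (by rw [htk]; omega : (buf.take start).length ≤ start + 1)]
    rw [show start + 1 - start = 1 from by omega,
        show start + 1 + m - start = m + 1 from by omega]
    rw [List.drop_of_length_le (by rw [htk]; omega : (buf.take start).length ≤ start + 1 + m)]
    simp only [List.take_succ_cons, List.take_zero, List.drop_succ_cons, List.nil_append,
      List.append_assoc, List.cons_append]
    rw [List.drop_drop]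
    congr 2
    congr 1
    · apply List.map_congr_left
      intro k _
      simp only [Function.comp, Nat.succ_eq_add_one]
      congr 1
      push_cast
      ring
    · congr 1
      omega

-- B's loop: growing a nonempty list by doubling its last element k+1 times beyond
-- the prefix produces the powers-of-two row in closed form.
theorem grow_spec :
    ∀ (k : Nat) (pre : List Int) (L : Int),
    growB (pre.length + 1 + k) (pre ++ [L])
      = pre ++ (List.range (k + 1)).map (fun j => 2 ^ j * L) := by
  intro k
  induction k with
  | zero =>
    intro pre L
    rw [growB]
    simp
  | succ m ih =>
    intro pre L
    rw [growB]
    have hlt : (pre ++ [L]).length < pre.length + 1 + (m + 1) := by simp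
    rw [if_pos hlt, getLast!_concat_int]
    have h2 := ih (pre ++ [L]) (L * 2)
    have hlen : (pre ++ [L]).length + 1 + m = pre.length + 1 + (m + 1) := by simp; omega
    rw [hlen] at h2
    rw [h2, List.append_assoc]
    congr 1
    conv_rhs => rw [List.range_succ_eq_map, List.map_cons, List.map_map]
    have : ((fun j : ℕ => (2 : Int) ^ j * L) ∘ Nat.succ)
        = (fun j : ℕ => (2 : Int) ^ j * (L * 2)) := by
      funext j; simp [Function.comp, pow_succ]; ring
    rw [this]
    simp

theorem evol_eq (n : Int) (seed : Int × Int) (c : Int) (h : 3 ≤ n) :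
    evol_num_formula n seed c = evol_num_formula_alt n seed c := by
  obtain ⟨x, y⟩ := seed
  unfold evol_num_formula evol_num_formula_alt
  simp only
  set s := x + y + c with hs
  set m := (n - 2).toNat with hm
  have hm1 : 1 ≤ m := by omega
  -- B side
  have htgt : (n - 1).toNat = ([x] : List Int).length + 1 + (m - 1) := by simp; omega
  have hout0 : ([x, s] : List Int) = [x] ++ [s] := rfl
  rw [htgt, hout0, grow_spec (m - 1) [x] s]
  have hm' : m - 1 + 1 = m := by omega
  rw [hm']
  have hsplit : (List.range m).map (fun j => (2 : Int) ^ j * s)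
      = (List.range (m - 1)).map (fun j => (2 : Int) ^ j * s) ++ [(2 : Int) ^ (m - 1) * s] := by
    conv_lhs => rw [show m = (m - 1) + 1 from by omega, List.range_succ]
    simp
  have hlast : ((([x] : List Int) ++ (List.range m).map (fun j => (2 : Int) ^ j * s)).getLast!)
      = (2 : Int) ^ (m - 1) * s := by
    rw [hsplit, show ([x] : List Int) ++ ((List.range (m - 1)).map (fun j => (2 : Int) ^ j * s)
          ++ [(2 : Int) ^ (m - 1) * s])
        = (([x] : List Int) ++ (List.range (m - 1)).map (fun j => (2 : Int) ^ j * s))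
          ++ [(2 : Int) ^ (m - 1) * s] from by rw [List.append_assoc]]
    exact getLast!_concat_int _ _
  rw [hlast]
  -- A side
  rw [PySem.List.pyRange_one]
  have hcnt : (n - 1 - 1).toNat = m := by omega
  rw [hcnt]
  have hmn : n.toNat = m + 2 := by omega
  have hbuf : (List.replicate n.toNat (0 : Int)).set 0 x
      = x :: List.replicate (m + 1) 0 := by rw [hmn]; rfl
  rw [hbuf]
  rw [show (fun k : ℕ => (1 : Int) + (k : Int)) = (fun k : ℕ => (((1 : Nat) : Int) + (k : Int)))
      from by norm_num]
  rw [foldA_set (fun i => (2 : Int) ^ (i - 1).toNat * s) m 1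
      (x :: List.replicate (m + 1) 0) (by simp; omega)]
  simp only [List.take_succ_cons, List.take_zero]
  have hdrop : (x :: List.replicate (m + 1) (0 : Int)).drop (1 + m) = [0] := by
    rw [show 1 + m = m + 1 from by omega, List.drop_succ_cons, List.drop_replicate]
    simp
  rw [hdrop]
  have hmid : ((List.range m).map fun k : ℕ => (2 : Int) ^ ((((1 : Nat) : Int) + (k : Int)) - 1).toNat * s)
      = (List.range m).map (fun j => (2 : Int) ^ j * s) := by
    apply List.map_congr_left
    intro k _
    have hk : ((((1 : Nat) : Int) + (k : Int)) - 1).toNat = k := by omega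
    rw [hk]
  rw [hmid]
  rw [show ([x] : List Int).length + 1 + (m - 1) = m + 1 from by simp; omega]
  have hexp : (n - 3).toNat = m - 1 := by omega
  rw [hexp]
  rw [show ((x : Int) :: List.nil) ++ (List.range m).map (fun j => (2 : Int) ^ j * s) ++ [(0 : Int)]
        = [x] ++ ((List.range m).map (fun j => (2 : Int) ^ j * s) ++ [0]) from by simp]
  rw [List.set_append_right _ _ (by simp : ([x] : List Int).length ≤ m + 1)]
  simp only [List.length_cons, List.length_nil]
  rw [List.set_append_right _ _ (by simp)]
  simp

-- ===== VERDICT (by name: the statement is the Claim_ definition above) =====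
theorem evol_num_formula_spec : Claim_equal_evol_num_formula := by
  intro n seed c _ hpre
  unfold Spec_evol_num_formula
  exact evol_eq n seed c hpre
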